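-- pv_equiv track=rewrite | github.com/fritz99-lang/pylearn | src/pylearn/utils/text_utils.py | strip_repl_prompts
-- ===== SOURCE A (Python) =====
-- def strip_repl_prompts(text: str) -> str:
--     """Strip >>> and ... prompts from REPL code to make it runnable."""
--     lines = text.strip().split("\n")
--     code_lines = []
--     for line in lines:
--         if line.startswith(">>> ") or line.startswith("... "):
--             code_lines.append(line[4:])
--         elif line.startswith(">>>") or line.startswith("..."):
--             code_lines.append(line[3:])
--         # Skip output lines (lines that don't start with prompts in REPL blocks)
--     return "\n".join(code_lines)
-- ===== SOURCE B (Python) =====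
-- def strip_repl_prompts(text: str) -> str:
--     """Strip >>> and ... prompts from REPL code to make it runnable.
--
--     Single character-level state machine over the stripped text: no line
--     splitting, no join; output characters are emitted as they are read.
--     """
--     out = []
--     emitted = False
--     state = "start"  # matching a prompt at the start of a line
--     buf = ""
--     for ch in text.strip():
--         if ch == "\n":
--             state = "start"
--             buf = ""
--         elif state == "start":
--             buf += ch
--             if buf == ">>>" or buf == "...":
--                 if emitted:
--                     out.append("\n")
--                 emitted = True
--                 state = "space"
--             elif not (">>>".startswith(buf) or "...".startswith(buf)):
--                 state = "skip"
--         elif state == "space":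
--             if ch != " ":
--                 out.append(ch)
--             state = "copy"
--         elif state == "copy":
--             out.append(ch)
--         # state == "skip": output line, discard the character
--     return "".join(out)
-- ===== Notes on version B (the rewrite author's own statement) =====
-- stated objective: alternative
-- what changed: Replaces A's split-into-lines + per-line startswith/slice accumulator loop with a single character-level finite state machine over the stripped text (states start/space/copy/skip) that emits output characters and separators as it reads, with no line list and no join.
import Mathlib
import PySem

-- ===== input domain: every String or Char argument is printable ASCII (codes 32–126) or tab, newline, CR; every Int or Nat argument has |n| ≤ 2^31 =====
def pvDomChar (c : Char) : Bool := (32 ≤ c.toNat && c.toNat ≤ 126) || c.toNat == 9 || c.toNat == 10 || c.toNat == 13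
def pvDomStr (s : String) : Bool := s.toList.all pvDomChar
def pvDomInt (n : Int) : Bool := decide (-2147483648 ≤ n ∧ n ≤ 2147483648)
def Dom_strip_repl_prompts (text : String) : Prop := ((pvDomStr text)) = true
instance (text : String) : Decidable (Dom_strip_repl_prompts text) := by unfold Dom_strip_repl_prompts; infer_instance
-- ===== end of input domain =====

-- B replaces A's split-into-lines + per-line startswith/slice accumulator with a single
-- character-level state machine over the stripped text (alternative decomposition; same cost).


-- ===== PORT A =====
def strip_repl_prompts (text : String) : String :=
  let lines := (PySem.Str.split? (PySem.Str.strip text) "\n").getD []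
  let code_lines := lines.foldl (fun acc line =>
    if PySem.Str.startswith line ">>> " || PySem.Str.startswith line "... " then
      acc ++ [PySem.Str.slice line (some 4) none]
    else if PySem.Str.startswith line ">>>" || PySem.Str.startswith line "..." then
      acc ++ [PySem.Str.slice line (some 3) none]
    else acc) []
  PySem.Str.join "\n" code_lines

-- ===== PORT B =====
-- B is a character-level state machine (states start/space/copy/skip) over the stripped text.
inductive PvSt
  | start | space | copy | skip
deriving DecidableEq, Repr

def pvStep (acc : List Char × Bool × PvSt × List Char) (ch : Char) :
    List Char × Bool × PvSt × List Char :=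
  match acc with
  | (out, emitted, st, buf) =>
    if ch = '\n' then (out, emitted, PvSt.start, [])
    else match st with
      | PvSt.start =>
          let buf' := buf ++ [ch]
          if buf' = ['>','>','>'] ∨ buf' = ['.','.','.'] then
            ((if emitted then out ++ ['\n'] else out), true, PvSt.space, buf')
          else if buf'.isPrefixOf ['>','>','>'] ∨ buf'.isPrefixOf ['.','.','.'] then
            (out, emitted, PvSt.start, buf')
          else (out, emitted, PvSt.skip, buf')
      | PvSt.space => ((if ch = ' ' then out else out ++ [ch]), emitted, PvSt.copy, buf)
      | PvSt.copy => (out ++ [ch], emitted, PvSt.copy, buf)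
      | PvSt.skip => (out, emitted, PvSt.skip, buf)

def strip_repl_prompts_alt (text : String) : String :=
  let r := (PySem.Str.strip text).toList.foldl pvStep ([], false, PvSt.start, [])
  String.ofList r.1

-- ===== PRECONDITION & SPEC =====
def Spec_strip_repl_prompts (text : String) (out : String) : Prop := out = strip_repl_prompts_alt text
instance (text : String) (out : String) : Decidable (Spec_strip_repl_prompts text out) := by unfold Spec_strip_repl_prompts; infer_instance

-- ===== CLAIM (what is proved, stated in full; the proofs are below) =====
def Claim_equal_strip_repl_prompts : Prop := ∀ (text : String), Dom_strip_repl_prompts text → Spec_strip_repl_prompts text (strip_repl_prompts text)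

-- ===== LEMMAS AND PROOFS =====

-- A's per-line branch as an Option-valued function, String level and Chars level.
def keepS (line : String) : Option String :=
  if PySem.Str.startswith line ">>> " || PySem.Str.startswith line "... " then
    some (PySem.Str.slice line (some 4) none)
  else if PySem.Str.startswith line ">>>" || PySem.Str.startswith line "..." then
    some (PySem.Str.slice line (some 3) none)
  else none

def keepA (l : List Char) : Option (List Char) :=
  if ['>','>','>',' '].isPrefixOf l ∨ ['.','.','.',' '].isPrefixOf l then some (l.drop 4)
  else if ['>','>','>'].isPrefixOf l ∨ ['.','.','.'].isPrefixOf l then some (l.drop 3)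
  else none

-- split of a char list at '\n', structural version
def splitNL : List Char → List (List Char)
  | [] => [[]]
  | c :: rest => if c = '\n' then [] :: splitNL rest else (splitNL rest).modifyHead (c :: ·)

-- what B's machine renders from a list of lines
def gRun : Bool → List (List Char) → List Char
  | _, [] => []
  | e, l :: ls =>
    match keepA l with
    | none => gRun e ls
    | some k => (if e then '\n' :: k else k) ++ gRun true ls

theorem splitNL_ne_nil (cs : List Char) : splitNL cs ≠ [] := by
  induction cs with
  | nil => simp [splitNL]
  | cons c rest ih =>
    simp only [splitNL]
    split_ifs
    · simp
    · cases h : splitNL rest <;> simp_all [List.modifyHead]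

theorem splitNL_cons' (cs : List Char) : ∃ a tl, splitNL cs = a :: tl := by
  cases h : splitNL cs with
  | nil => exact absurd h (splitNL_ne_nil cs)
  | cons a tl => exact ⟨a, tl, rfl⟩

theorem splitNL_no_nl (l : List Char) (h : '\n' ∉ l) : splitNL l = [l] := by
  induction l with
  | nil => simp [splitNL]
  | cons c rest ih =>
    simp only [List.mem_cons, not_or] at h
    simp [splitNL, Ne.symm h.1, ih h.2]

theorem splitNL_append (l r : List Char) (h : '\n' ∉ l) :
    splitNL (l ++ '\n' :: r) = l :: splitNL r := by
  induction l with
  | nil => simp [splitNL]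
  | cons c rest ih =>
    simp only [List.mem_cons, not_or] at h
    simp [splitNL, Ne.symm h.1, ih h.2]

theorem go_spec (l : List Char) : ∀ (fuel : Nat) (cur : List Char) (acc : List (List Char)),
    l.length ≤ fuel →
    PySem.Chars.splitOn.go ['\n'] fuel l cur acc
      = acc.reverse ++ (splitNL l).modifyHead (cur.reverse ++ ·) := by
  induction l with
  | nil =>
    intro fuel cur acc _
    cases fuel <;> simp [PySem.Chars.splitOn.go, splitNL]
  | cons c rest ih =>
    intro fuel cur acc hf
    cases fuel with
    | zero => simp at hf
    | succ f =>
      by_cases hc : c = '\n'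
      · subst hc
        have hpre : List.isPrefixOf ['\n'] ('\n' :: rest) = true := by
          simp [List.isPrefixOf]
        have hdrop : List.drop (['\n'] : List Char).length ('\n' :: rest) = rest := by simp
        simp only [PySem.Chars.splitOn.go, hpre, if_pos, hdrop]
        rw [ih f [] (cur.reverse :: acc) (by simpa using hf)]
        obtain ⟨a, tl, he⟩ := splitNL_cons' rest
        simp [splitNL, he, List.modifyHead]
      · have hpre : List.isPrefixOf ['\n'] (c :: rest) = false := by
          simp [List.isPrefixOf, Ne.symm hc]
        simp only [PySem.Chars.splitOn.go, hpre]
        rw [if_neg (by simp)]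
        rw [ih f (c :: cur) acc (by simpa using Nat.le_of_succ_le_succ hf)]
        obtain ⟨a, tl, he⟩ := splitNL_cons' rest
        simp [splitNL, hc, he, List.modifyHead]

theorem splitOn_nl (cs : List Char) : PySem.Chars.splitOn cs ['\n'] = splitNL cs := by
  unfold PySem.Chars.splitOn
  rw [go_spec cs (cs.length + 1) [] [] (by omega)]
  obtain ⟨a, tl, he⟩ := splitNL_cons' cs
  simp [he, List.modifyHead]

-- A's accumulator loop is filterMap keepS
theorem A_foldl (lines : List String) (acc : List String) :
    lines.foldl (fun acc line =>
      if PySem.Str.startswith line ">>> " || PySem.Str.startswith line "... " then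
        acc ++ [PySem.Str.slice line (some 4) none]
      else if PySem.Str.startswith line ">>>" || PySem.Str.startswith line "..." then
        acc ++ [PySem.Str.slice line (some 3) none]
      else acc) acc = acc ++ lines.filterMap keepS := by
  induction lines generalizing acc with
  | nil => simp
  | cons l ls ih =>
    simp only [List.foldl_cons, List.filterMap_cons]
    by_cases h1 : (PySem.Str.startswith l ">>> " || PySem.Str.startswith l "... ") = true
    · have hk : keepS l = some (PySem.Str.slice l (some 4) none) := by
        unfold keepS; rw [if_pos h1]
      rw [if_pos h1, hk, ih]
      simp
    · rw [if_neg h1]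
      by_cases h2 : (PySem.Str.startswith l ">>>" || PySem.Str.startswith l "...") = true
      · have hk : keepS l = some (PySem.Str.slice l (some 3) none) := by
          unfold keepS; rw [if_neg h1, if_pos h2]
        rw [if_pos h2, hk, ih]
        simp
      · have hk : keepS l = none := by
          unfold keepS; rw [if_neg h1, if_neg h2]
        rw [if_neg h2, hk, ih]

-- per-line bridge: keepS on strings is keepA on char lists
theorem keepS_ofList (l : List Char) :
    keepS (String.ofList l) = (keepA l).map String.ofList := by
  have hsl : ∀ n : Nat, PySem.Str.slice (String.ofList l) (some (n : Int)) none
      = String.ofList (l.drop n) := by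
    intro n
    have h : (PySem.Str.slice (String.ofList l) (some (n : Int)) none).toList = l.drop n := by
      simp [PySem.Str.toList_slice, PySem.Chars.slice_eq_listSlice,
        PySem.List.slice_from_natCast]
    calc PySem.Str.slice (String.ofList l) (some (n : Int)) none
        = String.ofList (PySem.Str.slice (String.ofList l) (some (n : Int)) none).toList := by
          rw [String.ofList_toList]
      _ = String.ofList (l.drop n) := by rw [h]
  have hsl4 : PySem.Str.slice (String.ofList l) (some (4 : Int)) none
      = String.ofList (l.drop 4) := by simpa using hsl 4
  have hsl3 : PySem.Str.slice (String.ofList l) (some (3 : Int)) none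
      = String.ofList (l.drop 3) := by simpa using hsl 3
  have t4 : (">>> " : String).toList = ['>','>','>',' '] := by decide
  have t4' : ("... " : String).toList = ['.','.','.',' '] := by decide
  have t3 : (">>>" : String).toList = ['>','>','>'] := by decide
  have t3' : ("..." : String).toList = ['.','.','.'] := by decide
  simp only [keepS, keepA, PySem.Str.startswith_eq, PySem.Chars.startswith,
    String.toList_ofList, t4, t4', t3, t3']
  split_ifs with h1 h2 h3 h4 h5 h6 <;> simp_all

-- newline resets the machine, whatever its state
theorem step_nl (r : List Char × Bool × PvSt × List Char) :
    pvStep r '\n' = (r.1, r.2.1, PvSt.start, []) := by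
  obtain ⟨out, e, st, buf⟩ := r
  simp [pvStep]

theorem run_copy (l : List Char) (h : '\n' ∉ l) (out : List Char) (e : Bool) (buf : List Char) :
    l.foldl pvStep (out, e, PvSt.copy, buf) = (out ++ l, e, PvSt.copy, buf) := by
  induction l generalizing out with
  | nil => simp
  | cons c r ih =>
    simp only [List.mem_cons, not_or] at h
    simp only [List.foldl_cons, pvStep, if_neg (Ne.symm h.1 : ¬ c = '\n')]
    rw [ih h.2]
    simp

theorem run_skip (l : List Char) (h : '\n' ∉ l) (out : List Char) (e : Bool) (buf : List Char) :
    l.foldl pvStep (out, e, PvSt.skip, buf) = (out, e, PvSt.skip, buf) := by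
  induction l with
  | nil => simp
  | cons c r ih =>
    simp only [List.mem_cons, not_or] at h
    simp only [List.foldl_cons, pvStep, if_neg (Ne.symm h.1 : ¬ c = '\n')]
    exact ih h.2

-- running one '\n'-free line from the start state
theorem line_run (l : List Char) (h : '\n' ∉ l) (out : List Char) (e : Bool) :
    (l.foldl pvStep (out, e, PvSt.start, [])).1
      = out ++ (match keepA l with
                | none => []
                | some k => (if e then '\n' :: k else k))
    ∧ (l.foldl pvStep (out, e, PvSt.start, [])).2.1 = (e || (keepA l).isSome) := by
  rcases l with _ | ⟨a, l1⟩
  · simp [keepA, List.isPrefixOf]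
  simp only [List.mem_cons, not_or] at h
  obtain ⟨ha, h1⟩ := h
  have han : ¬ a = '\n' := Ne.symm ha
  by_cases haP : a = '>' ∨ a = '.'
  · -- a could begin a prompt
    have e1 : ¬ (([a] : List Char) = ['>','>','>'] ∨ ([a] : List Char) = ['.','.','.']) := by simp
    have p1 : (([a] : List Char).isPrefixOf ['>','>','>'] = true ∨
        ([a] : List Char).isPrefixOf ['.','.','.'] = true) := by
      rcases haP with rfl | rfl <;> simp [List.isPrefixOf]
    have s1 : pvStep (out, e, PvSt.start, []) a = (out, e, PvSt.start, [a]) := by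
      simp only [pvStep, if_neg han, List.nil_append]
      rw [if_neg e1, if_pos p1]
    rcases l1 with _ | ⟨b, l2⟩
    · -- l = [a]
      have hk : keepA [a] = none := by
        rcases haP with rfl | rfl <;> simp [keepA, List.isPrefixOf]
      rw [List.foldl_cons, s1, List.foldl_nil, hk]
      simp
    simp only [List.mem_cons, not_or] at h1
    obtain ⟨hb, h2⟩ := h1
    have hbn : ¬ b = '\n' := Ne.symm hb
    by_cases hbP : a = b
    · -- two prompt chars so far
      subst hbP
      have e2 : ¬ (([a, a] : List Char) = ['>','>','>'] ∨ ([a, a] : List Char) = ['.','.','.']) := by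
        simp
      have p2 : (([a, a] : List Char).isPrefixOf ['>','>','>'] = true ∨
          ([a, a] : List Char).isPrefixOf ['.','.','.'] = true) := by
        rcases haP with rfl | rfl <;> simp [List.isPrefixOf]
      have s2 : pvStep (out, e, PvSt.start, [a]) a = (out, e, PvSt.start, [a, a]) := by
        simp only [pvStep, if_neg han]
        rw [if_neg (by simpa using e2), if_pos (by simpa using p2)]
        simp
      rcases l2 with _ | ⟨c, l3⟩
      · -- l = [a, a]
        have hk : keepA [a, a] = none := by
          rcases haP with rfl | rfl <;> simp [keepA, List.isPrefixOf]
        rw [List.foldl_cons, List.foldl_cons, s1, s2, List.foldl_nil, hk]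
        simp
      simp only [List.mem_cons, not_or] at h2
      obtain ⟨hc, h3⟩ := h2
      have hcn : ¬ c = '\n' := Ne.symm hc
      by_cases hcP : a = c
      · -- full prompt matched
        subst hcP
        have e3 : (([a, a, a] : List Char) = ['>','>','>'] ∨
            ([a, a, a] : List Char) = ['.','.','.']) := by
          rcases haP with rfl | rfl <;> simp
        have s3 : pvStep (out, e, PvSt.start, [a, a]) a
            = ((if e then out ++ ['\n'] else out), true, PvSt.space, [a, a, a]) := by
          simp only [pvStep, if_neg han]
          rw [if_pos (by simpa using e3)]
          simp
        rcases l3 with _ | ⟨d, l4⟩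
        · -- l = [a, a, a]
          have hk : keepA [a, a, a] = some [] := by
            rcases haP with rfl | rfl <;> simp [keepA, List.isPrefixOf]
          rw [List.foldl_cons, List.foldl_cons, List.foldl_cons, s1, s2, s3,
            List.foldl_nil, hk]
          constructor
          · split_ifs <;> simp
          · simp
        simp only [List.mem_cons, not_or] at h3
        obtain ⟨hd, h4⟩ := h3
        have hdn : ¬ d = '\n' := Ne.symm hd
        have s4 : pvStep ((if e then out ++ ['\n'] else out), true, PvSt.space, [a, a, a]) d
            = ((if d = ' ' then (if e then out ++ ['\n'] else out)
                else (if e then out ++ ['\n'] else out) ++ [d]),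
               true, PvSt.copy, [a, a, a]) := by
          simp [pvStep, if_neg hdn]
        rw [List.foldl_cons, List.foldl_cons, List.foldl_cons, List.foldl_cons,
          s1, s2, s3, s4, run_copy l4 h4]
        by_cases hdsp : d = ' '
        · subst hdsp
          have hk : keepA (a :: a :: a :: ' ' :: l4) = some l4 := by
            rcases haP with rfl | rfl <;> simp [keepA, List.isPrefixOf]
          rw [hk]
          constructor
          · split_ifs <;> simp_all
          · simp
        · have hk : keepA (a :: a :: a :: d :: l4) = some (d :: l4) := by
            rcases haP with rfl | rfl <;>
              simp [keepA, List.isPrefixOf, beq_eq_false_iff_ne.mpr (Ne.symm hdsp)]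
          rw [hk, if_neg hdsp]
          constructor
          · split_ifs <;> simp_all
          · simp
      · -- third char breaks the prompt
        have hcP2 : ¬ c = a := fun hh => hcP hh.symm
        have e3 : ¬ (([a, a, c] : List Char) = ['>','>','>'] ∨
            ([a, a, c] : List Char) = ['.','.','.']) := by
          rcases haP with rfl | rfl <;> simp [hcP2]
        have p3 : ¬ (([a, a, c] : List Char).isPrefixOf ['>','>','>'] = true ∨
            ([a, a, c] : List Char).isPrefixOf ['.','.','.'] = true) := by
          rcases haP with rfl | rfl <;>
            simp [List.isPrefixOf, hcP2]
        have s3 : pvStep (out, e, PvSt.start, [a, a]) c = (out, e, PvSt.skip, [a, a, c]) := by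
          simp only [pvStep, if_neg hcn]
          rw [if_neg (by simpa using e3), if_neg (by simpa using p3)]
          simp
        have hk : keepA (a :: a :: c :: l3) = none := by
          rcases haP with rfl | rfl <;>
            simp [keepA, List.isPrefixOf, hcP]
        rw [List.foldl_cons, List.foldl_cons, List.foldl_cons, s1, s2, s3,
          run_skip l3 h3, hk]
        simp
    · -- second char breaks the prompt
      have hbP2 : ¬ b = a := fun hh => hbP hh.symm
      have e2 : ¬ (([a, b] : List Char) = ['>','>','>'] ∨ ([a, b] : List Char) = ['.','.','.']) := by
        simp
      have p2 : ¬ (([a, b] : List Char).isPrefixOf ['>','>','>'] = true ∨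
          ([a, b] : List Char).isPrefixOf ['.','.','.'] = true) := by
        rcases haP with rfl | rfl <;> simp [List.isPrefixOf, hbP2]
      have s2 : pvStep (out, e, PvSt.start, [a]) b = (out, e, PvSt.skip, [a, b]) := by
        simp only [pvStep, if_neg hbn]
        rw [if_neg (by simpa using e2), if_neg (by simpa using p2)]
        simp
      have hk : keepA (a :: b :: l2) = none := by
        rcases haP with rfl | rfl <;> simp [keepA, List.isPrefixOf, hbP]
      rw [List.foldl_cons, List.foldl_cons, s1, s2, run_skip l2 h2, hk]
      simp
  · -- first char cannot begin a prompt
    rw [not_or] at haP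
    have na1 : ('>' == a) = false := beq_eq_false_iff_ne.mpr (Ne.symm haP.1)
    have na2 : ('.' == a) = false := beq_eq_false_iff_ne.mpr (Ne.symm haP.2)
    have e1 : ¬ (([a] : List Char) = ['>','>','>'] ∨ ([a] : List Char) = ['.','.','.']) := by simp
    have p1 : ¬ (([a] : List Char).isPrefixOf ['>','>','>'] = true ∨
        ([a] : List Char).isPrefixOf ['.','.','.'] = true) := by
      simp [List.isPrefixOf, haP.1, haP.2]
    have s1 : pvStep (out, e, PvSt.start, []) a = (out, e, PvSt.skip, [a]) := by
      simp only [pvStep, if_neg han, List.nil_append]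
      rw [if_neg e1, if_neg p1]
    have hk : keepA (a :: l1) = none := by
      simp [keepA, List.isPrefixOf, na1, na2]
    rw [List.foldl_cons, s1, run_skip l1 h1, hk]
    simp

theorem mem_split_first_nl (cs : List Char) (h : '\n' ∈ cs) :
    ∃ l r, cs = l ++ '\n' :: r ∧ '\n' ∉ l := by
  induction cs with
  | nil => simp at h
  | cons c rest ih =>
    by_cases hc : c = '\n'
    · exact ⟨[], rest, by simp [hc], by simp⟩
    · have : '\n' ∈ rest := by
        rcases List.mem_cons.mp h with h' | h'
        · exact absurd h'.symm hc
        · exact h'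
      obtain ⟨l, r, he, hl⟩ := ih this
      exact ⟨c :: l, r, by simp [he], by simp [Ne.symm hc, hl]⟩

-- the machine over the whole text renders gRun over the split lines
theorem auto_run : ∀ (n : Nat) (cs : List Char), cs.length ≤ n → ∀ (out : List Char) (e : Bool),
    (cs.foldl pvStep (out, e, PvSt.start, [])).1 = out ++ gRun e (splitNL cs) := by
  intro n
  induction n with
  | zero =>
    intro cs hc out e
    have : cs = [] := List.length_eq_zero_iff.mp (Nat.le_zero.mp hc)
    subst this
    simp [splitNL, gRun, keepA, List.isPrefixOf]
  | succ n ih =>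
    intro cs hc out e
    by_cases hmem : '\n' ∈ cs
    · obtain ⟨l, r, he, hl⟩ := mem_split_first_nl cs hmem
      subst he
      rw [List.foldl_append, List.foldl_cons, step_nl,
        (line_run l hl out e).1, (line_run l hl out e).2,
        splitNL_append l r hl]
      have hr : r.length ≤ n := by
        simp [List.length_append] at hc
        omega
      rw [ih r hr]
      cases hk : keepA l with
      | none => simp [gRun, hk]
      | some k => simp [gRun, hk]
    · rw [(line_run cs hmem out e).1, splitNL_no_nl cs hmem]
      cases hk : keepA cs with
      | none => simp [gRun, hk]
      | some k => simp [gRun, hk]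

-- gRun is join of the kept lines
theorem gRun_join (L : List (List Char)) : ∀ (e : Bool),
    gRun e L = (if L.filterMap keepA = [] then []
                else (if e then ['\n'] else []) ++ PySem.Chars.join ['\n'] (L.filterMap keepA)) := by
  induction L with
  | nil => intro e; simp [gRun]
  | cons l ls ih =>
    intro e
    cases hk : keepA l with
    | none => simp only [gRun, hk, List.filterMap_cons]; exact ih e
    | some k =>
      simp only [gRun, hk, List.filterMap_cons, ih true]
      cases hfm : ls.filterMap keepA with
      | nil =>
        simp only [if_neg (by simp : ¬ ([k] : List (List Char)) = [])]
        rw [PySem.Chars.join_singleton]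
        split_ifs <;> simp
      | cons k' ks =>
        simp only [if_neg (by simp : ¬ (k :: k' :: ks : List (List Char)) = []),
          if_neg (by simp : ¬ (k' :: ks : List (List Char)) = [])]
        rw [PySem.Chars.join_cons_cons]
        split_ifs <;> simp

theorem B_chars (text : String) :
    (strip_repl_prompts_alt text).toList = gRun false (splitNL (PySem.Str.strip text).toList) := by
  simp only [strip_repl_prompts_alt, String.toList_ofList]
  rw [auto_run (PySem.Str.strip text).toList.length _ (le_refl _)]
  rw [List.nil_append]

theorem A_chars (text : String) :
    (strip_repl_prompts text).toList
      = PySem.Chars.join ['\n'] ((splitNL (PySem.Str.strip text).toList).filterMap keepA) := by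
  have hnl : ("\n" : String).toList = ['\n'] := rfl
  have hsplit : PySem.Str.split? (PySem.Str.strip text) "\n"
      = some ((splitNL (PySem.Str.strip text).toList).map String.ofList) := by
    simp only [PySem.Str.split?, hnl]
    simp [PySem.Chars.split?, splitOn_nl]
  simp only [strip_repl_prompts, hsplit, Option.getD_some]
  rw [A_foldl, List.nil_append, PySem.Str.toList_join, hnl]
  have hfm : (((splitNL (PySem.Str.strip text).toList).map String.ofList).filterMap keepS)
      = ((splitNL (PySem.Str.strip text).toList).filterMap keepA).map String.ofList := by
    rw [List.filterMap_map, List.map_filterMap]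
    congr 1
    funext l
    simp [Function.comp, keepS_ofList]
  rw [hfm, List.map_map]
  have hid : (String.toList ∘ String.ofList) = (id : List Char → List Char) :=
    funext (fun l => String.toList_ofList)
  rw [hid, List.map_id]

-- ===== VERDICT (by name: the statement is the Claim_ definition above) =====
theorem strip_repl_prompts_spec : Claim_equal_strip_repl_prompts := by
  intro text _
  unfold Spec_strip_repl_prompts
  have hlists : (strip_repl_prompts text).toList = (strip_repl_prompts_alt text).toList := by
    rw [A_chars, B_chars, gRun_join]
    by_cases h0 : List.filterMap keepA (splitNL (PySem.Str.strip text).toList) = []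
    · rw [if_pos h0, h0, PySem.Chars.join_nil]
    · rw [if_neg h0]
      simp
  calc strip_repl_prompts text
      = String.ofList (strip_repl_prompts text).toList := String.ofList_toList.symm
    _ = String.ofList (strip_repl_prompts_alt text).toList := by rw [hlists]
    _ = strip_repl_prompts_alt text := String.ofList_toList
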